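-- pv_equiv track=rewrite | github.com/GlobalCan/donna | src/donna/adapter/discord_adapter.py | _normalize_for_mobile
-- ===== SOURCE A (Python) =====
-- def _normalize_for_mobile(text: str) -> str:
--     """Light normalization that improves mobile readability without changing
--     semantics. Cheap and idempotent so it can run on every outgoing message.
--
--     - Collapse 3+ consecutive blank lines to 2 (mobile renders empty lines
--       with full vertical spacing; runs of them push real content off-screen).
--     - Strip trailing whitespace per line (leftover spaces sometimes survive
--       markdown rendering and look like artifacts on mobile clients).
--     - Convert leading-tab indented blocks to 2-space (Discord mobile renders
--       tabs at varying widths; 2-space stays consistent).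
--     """
--     if not text:
--         return text
--     lines = [ln.rstrip() for ln in text.split("\n")]
--     # Collapse 2+ blanks to 1 — mobile thumb-scroll feedback was that
--     # multiple blank lines push real content off-screen. One blank line
--     # between paragraphs is enough visual separation on a phone.
--     out: list[str] = []
--     blank_run = 0
--     for ln in lines:
--         if not ln:
--             blank_run += 1
--             if blank_run <= 1:
--                 out.append(ln)
--         else:
--             blank_run = 0
--             out.append(ln.replace("\t", "  "))
--     return "\n".join(out)
-- ===== SOURCE B (Python) =====
-- def _normalize_for_mobile(text: str) -> str:
--     if not text:
--         return text
--     lines = [ln.rstrip() for ln in text.split("\n")]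
--     out: list[str] = []
--     i = 0
--     n = len(lines)
--     while i < n:
--         if lines[i] == "":
--             # a maximal run of blank lines collapses to a single blank line
--             out.append("")
--             while i < n and lines[i] == "":
--                 i += 1
--         else:
--             out.append(lines[i].replace("\t", "  "))
--             i += 1
--     return "\n".join(out)
-- ===== Notes on version B (the rewrite author's own statement) =====
-- stated objective: alternative
-- what changed: Replaces the stateful blank_run counter fold with run-grouping: an index loop that emits one blank line per maximal run of blanks and copies non-blank lines, skipping each blank run in an inner loop.
import Mathlib
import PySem

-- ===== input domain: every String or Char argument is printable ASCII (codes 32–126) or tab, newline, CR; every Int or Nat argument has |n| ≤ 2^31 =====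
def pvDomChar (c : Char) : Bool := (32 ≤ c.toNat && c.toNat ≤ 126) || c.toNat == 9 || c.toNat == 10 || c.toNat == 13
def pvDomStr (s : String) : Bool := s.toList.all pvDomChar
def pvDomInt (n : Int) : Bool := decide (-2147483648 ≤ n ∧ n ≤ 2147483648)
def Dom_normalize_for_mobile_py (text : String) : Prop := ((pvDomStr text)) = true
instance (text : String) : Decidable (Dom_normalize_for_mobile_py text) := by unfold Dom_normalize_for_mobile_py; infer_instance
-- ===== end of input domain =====

-- B replaces A's stateful blank_run counter fold with run-grouping (skip each maximal blank run); alternative decomposition, same cost.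


-- ===== PORT A =====
-- ln.replace("\t", "  ")
def pvReplTab (s : String) : String := PySem.Str.replace s "\t" "  "

-- the body of A's for-loop: state = (out, blank_run)
def pvAStep (st : List String × Int) (ln : String) : List String × Int :=
  if ln == "" then
    (if st.2 + 1 ≤ 1 then st.1 ++ [ln] else st.1, st.2 + 1)
  else
    (st.1 ++ [pvReplTab ln], 0)

def normalize_for_mobile_py (text : String) : String :=
  if text == "" then text
  else
    let lines := ((PySem.Str.split? text "\n").getD []).map PySem.Str.rstrip
    PySem.Str.join "\n" (lines.foldl pvAStep ([], 0)).1

-- ===== PORT B =====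
-- run-grouping loop of Source B: a blank line emits one "" and the whole blank run is skipped
def pvAltLoop : List String → List String
  | [] => []
  | l :: ls =>
    if l == "" then "" :: pvAltLoop (ls.dropWhile (fun x => x == ""))
    else pvReplTab l :: pvAltLoop ls
termination_by ls => ls.length
decreasing_by
  · exact Nat.lt_succ_of_le (List.length_dropWhile_le _ _)
  · simp

def normalize_for_mobile_py_alt (text : String) : String :=
  if text == "" then text
  else
    let lines := ((PySem.Str.split? text "\n").getD []).map PySem.Str.rstrip
    PySem.Str.join "\n" (pvAltLoop lines)

-- ===== PRECONDITION & SPEC =====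
def Spec_normalize_for_mobile_py (text : String) (out : String) : Prop := out = normalize_for_mobile_py_alt text
instance (text : String) (out : String) : Decidable (Spec_normalize_for_mobile_py text out) := by unfold Spec_normalize_for_mobile_py; infer_instance

-- ===== CLAIM (what is proved, stated in full; the proofs are below) =====
def Claim_equal_normalize_for_mobile_py : Prop := ∀ (text : String), Dom_normalize_for_mobile_py text → Spec_normalize_for_mobile_py text (normalize_for_mobile_py text)

-- ===== LEMMAS AND PROOFS =====

-- recursive characterisation of A's fold output (the suffix appended to out, given blank_run = r)
def pvARun : List String → Int → List String
  | [], _ => []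
  | l :: ls, r =>
    if l == "" then (if r + 1 ≤ 1 then [l] else []) ++ pvARun ls (r + 1)
    else pvReplTab l :: pvARun ls 0

lemma pvAStep_foldl_eq (ls : List String) : ∀ (out : List String) (r : Int),
    (ls.foldl pvAStep (out, r)).1 = out ++ pvARun ls r := by
  induction ls with
  | nil => intro out r; simp [pvARun]
  | cons l ls ih =>
    intro out r
    by_cases h : l == ""
    · by_cases hr : r + 1 ≤ 1 <;>
        simp [pvARun, pvAStep, h, hr, List.foldl_cons, ih]
    · simp [pvARun, pvAStep, h, List.foldl_cons, ih]

lemma pvARun_skip (ls : List String) : ∀ r : Int, 1 ≤ r → pvARun ls r = pvARun ls 1 := by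
  induction ls with
  | nil => intro r _; rfl
  | cons l ls ih =>
    intro r hr
    by_cases h : l == ""
    · have h1 : ¬ (r + 1 ≤ 1) := by omega
      have h2 : ¬ ((1:Int) + 1 ≤ 1) := by omega
      simp only [pvARun, h, h1, h2, ite_false]
      rw [ih (r + 1) (by omega), ih (1 + 1) (by omega)]
    · simp [pvARun, h]

lemma pvARun_eq_altLoop (ls : List String) :
    pvARun ls 0 = pvAltLoop ls ∧ pvARun ls 1 = pvAltLoop (ls.dropWhile (fun x => x == "")) := by
  induction ls with
  | nil => exact ⟨by simp [pvAltLoop, pvARun], by simp [pvAltLoop, pvARun]⟩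
  | cons l ls ih =>
    by_cases h : l == ""
    · have hl : l = "" := by simpa using h
      constructor
      · rw [pvAltLoop]
        simp only [pvARun, hl]
        norm_num
        rw [pvARun_skip ls 1 le_rfl, ih.2]
      · have : ¬ ((1:Int) + 1 ≤ 1) := by omega
        simp only [pvARun, this, ite_false, List.nil_append, List.dropWhile_cons, hl]
        simp only [pvARun_skip ls (1+1) (by omega), ih.2]
        simp
    · constructor
      · rw [pvAltLoop]; simp [pvARun, h, ih.1]
      · rw [List.dropWhile_cons_of_neg (by simpa using h), pvAltLoop]
        simp [pvARun, h, ih.1]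

-- ===== VERDICT (by name: the statement is the Claim_ definition above) =====
theorem normalize_for_mobile_py_spec : Claim_equal_normalize_for_mobile_py := by
  intro text _
  unfold Spec_normalize_for_mobile_py normalize_for_mobile_py normalize_for_mobile_py_alt
  by_cases h : text == ""
  · simp [h]
  · simp only [h, Bool.false_eq_true, ite_false]
    rw [pvAStep_foldl_eq, (pvARun_eq_altLoop _).1]
    rfl
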